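-- pv_equiv track=rewrite | github.com/ChanMeng666/juejin-algorithm-practice | problems/029-string-conversion/solution.py | solution
-- ===== SOURCE A (Python) =====
-- def solution(s: str, k: int) -> str:
--     # Define character conversion rules
--     transform = {
--         'a': 'bc',
--         'b': 'ca',
--         'c': 'ab'
--     }
--
--     # Perform k conversions
--     for _ in range(k):
--         # Convert each character in the current string
--         new_s = ''
--         for char in s:
--             new_s += transform[char]
--         s = new_s
--
--     return s
-- ===== SOURCE B (Python) =====
-- def solution(s: str, k: int) -> str:
--     transform = {
--         'a': 'bc',
--         'b': 'ca',
--         'c': 'ab'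
--     }
--
--     def expand(c: str, n: int) -> str:
--         # base case: no expansion left, return the character itself
--         if n <= 0:
--             return c
--         return ''.join(expand(d, n - 1) for d in transform[c])
--
--     return ''.join(expand(c, k) for c in s)
-- ===== Notes on version B (the rewrite author's own statement) =====
-- stated objective: alternative
-- what changed: B expands each character independently by a per-character depth-k recursion (the substitution is context-free) instead of A's k sequential whole-string rewriting passes.
import Mathlib
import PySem

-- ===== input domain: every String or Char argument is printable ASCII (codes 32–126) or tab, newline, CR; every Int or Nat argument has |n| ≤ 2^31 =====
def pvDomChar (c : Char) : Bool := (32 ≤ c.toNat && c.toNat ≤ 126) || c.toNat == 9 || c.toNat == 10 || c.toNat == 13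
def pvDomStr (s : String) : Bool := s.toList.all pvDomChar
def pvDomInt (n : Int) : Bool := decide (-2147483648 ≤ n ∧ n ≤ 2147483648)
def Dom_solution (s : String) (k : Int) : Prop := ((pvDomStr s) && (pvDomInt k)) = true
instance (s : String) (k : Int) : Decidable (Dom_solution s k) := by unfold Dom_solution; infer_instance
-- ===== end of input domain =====

-- B expands each character independently by a per-character depth-k recursion (context-free substitution) instead of A's k sequential whole-string passes; same cost, different decomposition.


-- ===== PORT A =====
-- the dict literal {'a': 'bc', 'b': 'ca', 'c': 'ab'}
def transformA : PySem.Dict Char String :=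
  PySem.Dict.ofList [('a', "bc"), ('b', "ca"), ('c', "ab")]

-- transform[char] raises KeyError on a miss; Pre_solution excludes those inputs,
-- so getD with default "" is exact on the admitted domain.
def solution (s : String) (k : Int) : String :=
  (PySem.List.pyRange 0 k 1).foldl
    (fun cur _ =>
      String.ofList (cur.toList.foldl (fun acc ch => acc ++ (transformA.getD ch "").toList) []))
    s

-- ===== PORT B =====
def transformB : PySem.Dict Char String :=
  PySem.Dict.ofList [('a', "bc"), ('b', "ca"), ('c', "ab")]

-- expand(c, n): n<=0 → the char itself; else join of expansions of transform[c].
-- (Int depth n with n <= 0 base case ≡ recursion on n.toNat.)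
def expandB (c : Char) (n : Nat) : List Char :=
  match n with
  | 0 => [c]
  | Nat.succ m => (transformB.getD c "").toList.flatMap (fun d => expandB d m)

def solution_alt (s : String) (k : Int) : String :=
  String.ofList (s.toList.flatMap (fun c => expandB c k.toNat))

-- ===== PRECONDITION & SPEC =====
-- Pre_ excludes exactly the inputs where Python A raises KeyError: some character
-- outside {'a','b','c'} while k >= 1 triggers a failing dict lookup.
def Pre_solution (s : String) (k : Int) : Prop :=
  k ≤ 0 ∨ ∀ c ∈ s.toList, c = 'a' ∨ c = 'b' ∨ c = 'c'
instance (s : String) (k : Int) : Decidable (Pre_solution s k) := by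
  unfold Pre_solution; infer_instance
def pvWitness_solution : String × Int := ("ab", 0)

def Spec_solution (s : String) (k : Int) (out : String) : Prop := out = solution_alt s k
instance (s : String) (k : Int) (out : String) : Decidable (Spec_solution s k out) := by
  unfold Spec_solution; infer_instance

-- ===== CLAIM (what is proved, stated in full; the proofs are below) =====
def Claim_equal_solution : Prop :=
  ∀ (s : String) (k : Int), Dom_solution s k → Pre_solution s k →
    Spec_solution s k (solution s k)

-- ===== LEMMAS AND PROOFS =====

-- one pass of A's inner loop, on lists of chars
def stepL (l : List Char) : List Char := l.flatMap (fun ch => (transformA.getD ch "").toList)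

theorem foldl_append_eq_stepL (l : List Char) :
    l.foldl (fun acc ch => acc ++ (transformA.getD ch "").toList) [] = stepL l := by
  simpa [stepL] using
    PySem.List.foldl_append_eq_flatMap (l := l)
      (g := fun ch => (transformA.getD ch "").toList) (acc := [])

theorem transformB_eq : transformB = transformA := rfl

theorem expand_iterate (n : Nat) (l : List Char) :
    stepL^[n] l = l.flatMap (fun c => expandB c n) := by
  induction n generalizing l with
  | zero => simp [expandB]
  | succ m ih =>
      rw [Function.iterate_succ_apply, ih]
      simp only [stepL, expandB, transformB_eq, List.flatMap_assoc]

theorem foldl_const_iterate {α β : Type} (g : α → α) (l : List β) (x : α) :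
    l.foldl (fun cur _ => g cur) x = g^[l.length] x := by
  induction l generalizing x with
  | nil => rfl
  | cons h t ih => simp [List.foldl_cons, ih, Function.iterate_succ_apply]

theorem stepS_mk (l : List Char) :
    String.ofList (l.foldl (fun acc ch => acc ++ (transformA.getD ch "").toList) []) =
      String.ofList (stepL l) := by
  rw [foldl_append_eq_stepL]

theorem solution_eq_iterate (s : String) (k : Int) :
    solution s k = String.ofList (stepL^[k.toNat] s.toList) := by
  unfold solution
  rw [foldl_const_iterate, PySem.List.length_pyRange_one]
  have h : ∀ n (l : List Char),
      (fun cur : String =>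
        String.ofList (cur.toList.foldl (fun acc ch => acc ++ (transformA.getD ch "").toList) []))^[n]
        (String.ofList l) = String.ofList (stepL^[n] l) := by
    intro n
    induction n with
    | zero => intro l; rfl
    | succ m ih =>
        intro l
        rw [Function.iterate_succ_apply, Function.iterate_succ_apply]
        rw [show (String.ofList l).toList = l from String.toList_ofList (l := l)]
        rw [stepS_mk, ih]
  have hs : s = String.ofList s.toList := (String.ofList_toList (s := s)).symm
  calc _ = (fun cur : String =>
        String.ofList (cur.toList.foldl (fun acc ch => acc ++ (transformA.getD ch "").toList) []))^[(k - 0).toNat]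
        (String.ofList s.toList) := by rw [← hs]
    _ = _ := by rw [h]; norm_num

-- ===== VERDICT (by name: the statement is the Claim_ definition above) =====
theorem solution_spec : Claim_equal_solution := by
  intro s k _ _
  unfold Spec_solution solution_alt
  rw [solution_eq_iterate, expand_iterate]
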